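-- pv_equiv track=rewrite | github.com/choegyalsangpo88-create/tambola | backend/ticket_generator.py | _validate_ticket
-- ===== SOURCE A (Python) =====
-- from typing import List, Optional, Tuple
--
-- COLUMN_RANGES = [
--     (1, 9),     # Column 0: 1-9 (9 numbers)
--     (10, 19),   # Column 1: 10-19 (10 numbers)
--     (20, 29),   # Column 2: 20-29 (10 numbers)
--     (30, 39),   # Column 3: 30-39 (10 numbers)
--     (40, 49),   # Column 4: 40-49 (10 numbers)
--     (50, 59),   # Column 5: 50-59 (10 numbers)
--     (60, 69),   # Column 6: 60-69 (10 numbers)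
--     (70, 79),   # Column 7: 70-79 (10 numbers)
--     (80, 90),   # Column 8: 80-90 (11 numbers)
-- ]
--
-- def _validate_ticket(ticket: List[List[Optional[int]]]) -> bool:
--     """Validate ticket follows all rules."""
--     # Check row counts (each row must have exactly 5 numbers)
--     for row in ticket:
--         count = sum(1 for cell in row if cell is not None)
--         if count != 5:
--             return False
--
--     # Check column counts (each column must have 1-3 numbers)
--     for col in range(9):
--         count = sum(1 for row in range(3) if ticket[row][col] is not None)
--         if count < 1 or count > 3:
--             return False
--
--     # Check total numbers
--     total = sum(1 for row in ticket for cell in row if cell is not None)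
--     if total != 15:
--         return False
--
--     # Check column ranges
--     for col in range(9):
--         start, end = COLUMN_RANGES[col]
--         for row in range(3):
--             num = ticket[row][col]
--             if num is not None and (num < start or num > end):
--                 return False
--
--     # Check ascending order in columns
--     for col in range(9):
--         prev = 0
--         for row in range(3):
--             num = ticket[row][col]
--             if num is not None:
--                 if num <= prev:
--                     return False
--                 prev = num
--
--     return True
-- ===== SOURCE B (Python) =====
-- from typing import List, Optional
--
-- COLUMN_RANGES = [
--     (1, 9),
--     (10, 19),
--     (20, 29),
--     (30, 39),
--     (40, 49),
--     (50, 59),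
--     (60, 69),
--     (70, 79),
--     (80, 90),
-- ]
--
-- def _validate_ticket(ticket: List[List[Optional[int]]]) -> bool:
--     """Validate ticket: single fused column pass instead of five sequential scans."""
--     # Each row must carry exactly 5 numbers.
--     if any(sum(1 for cell in row if cell is not None) != 5 for row in ticket):
--         return False
--     if len(ticket) != 3:
--         return False
--     # One pass per column checks occupancy, range and strict ascending order at once.
--     for col, (start, end) in enumerate(COLUMN_RANGES):
--         count = 0
--         prev = 0
--         for row in range(3):
--             num = ticket[row][col]
--             if num is None:
--                 continue
--             count += 1
--             if num < start or num > end: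
--                 return False
--             if num <= prev:
--                 return False
--             prev = num
--         if count == 0:  # at most 3 cells per column, so 1..3 reduces to "non-empty"
--             return False
--     return True
-- ===== Notes on version B (the rewrite author's own statement) =====
-- stated objective: alternative
-- what changed: Replaces A's five sequential passes (row counts, column counts, total, ranges, column order) by one fused per-column traversal that checks occupancy, range and strict ascending order together, drops the redundant total==15 pass, and replaces it by a single length check.
import Mathlib
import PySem

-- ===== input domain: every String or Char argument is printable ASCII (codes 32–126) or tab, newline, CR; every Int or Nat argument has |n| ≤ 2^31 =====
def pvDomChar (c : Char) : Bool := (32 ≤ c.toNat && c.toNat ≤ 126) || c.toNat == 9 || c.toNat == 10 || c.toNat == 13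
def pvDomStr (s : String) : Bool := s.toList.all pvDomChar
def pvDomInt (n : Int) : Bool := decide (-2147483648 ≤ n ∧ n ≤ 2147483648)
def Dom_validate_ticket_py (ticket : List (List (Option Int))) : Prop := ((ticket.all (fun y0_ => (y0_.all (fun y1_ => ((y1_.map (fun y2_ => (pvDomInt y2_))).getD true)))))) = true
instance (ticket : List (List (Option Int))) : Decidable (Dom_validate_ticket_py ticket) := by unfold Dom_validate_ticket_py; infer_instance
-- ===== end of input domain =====

-- B replaces A's five sequential passes by one fused per-column pass (plus a row-count and a
-- length check); same return value on every ticket on which A returns (Pre_).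

-- ===== PORT A =====
-- Option Bool models A's control flow: none = IndexError (excluded by Pre_), some b = return b.
def pvColRangesA : List (Int × Int) :=
  [(1,9),(10,19),(20,29),(30,39),(40,49),(50,59),(60,69),(70,79),(80,90)]

-- ticket[r][c]
def pvCellA (t : List (List (Option Int))) (r c : Int) : Option (Option Int) :=
  match PySem.List.pyGet? t r with
  | none => none
  | some row => PySem.List.pyGet? row c

-- sum(1 for cell in row if cell is not None)
def pvRowCountA (row : List (Option Int)) : Int :=
  row.foldl (fun acc cell => if cell.isSome then acc + 1 else acc) 0

-- sum(1 for row in range(3) if ticket[row][col] is not None)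
def pvColCountA (t : List (List (Option Int))) (c : Int) : Option Int :=
  match pvCellA t 0 c with
  | none => none
  | some x0 =>
    match pvCellA t 1 c with
    | none => none
    | some x1 =>
      match pvCellA t 2 c with
      | none => none
      | some x2 =>
        some ((if x0.isSome then (1:Int) else 0) + (if x1.isSome then 1 else 0) +
              (if x2.isSome then 1 else 0))

-- for col in range(9): … column-count check
def pvLoop2A (t : List (List (Option Int))) : List Int → Option Bool
  | [] => some true
  | c :: rest =>
    match pvColCountA t c with
    | none => none
    | some k => if k < 1 ∨ k > 3 then some false else pvLoop2A t rest

-- sum(1 for row in ticket for cell in row if cell is not None)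
def pvTotalA (t : List (List (Option Int))) : Int :=
  t.foldl (fun acc row => acc + pvRowCountA row) 0

-- inner rows of the range check for one column
def pvRangeColA (t : List (List (Option Int))) (c lo hi : Int) : List Int → Option Bool
  | [] => some true
  | r :: rest =>
    match pvCellA t r c with
    | none => none
    | some none => pvRangeColA t c lo hi rest
    | some (some n) => if n < lo ∨ n > hi then some false else pvRangeColA t c lo hi rest

-- for col in range(9): start, end = COLUMN_RANGES[col]; …
def pvLoop4A (t : List (List (Option Int))) : List Int → Option Bool
  | [] => some true
  | c :: rest =>
    match PySem.List.pyGet? pvColRangesA c with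
    | none => none
    | some (lo, hi) =>
      match pvRangeColA t c lo hi (PySem.List.pyRange 0 3 1) with
      | none => none
      | some false => some false
      | some true => pvLoop4A t rest

-- inner rows of the ascending check for one column (prev threaded)
def pvAscColA (t : List (List (Option Int))) (c : Int) : List Int → Int → Option Bool
  | [], _ => some true
  | r :: rest, prev =>
    match pvCellA t r c with
    | none => none
    | some none => pvAscColA t c rest prev
    | some (some n) => if n ≤ prev then some false else pvAscColA t c rest n

-- for col in range(9): prev = 0; …
def pvLoop5A (t : List (List (Option Int))) : List Int → Option Bool
  | [] => some true
  | c :: rest =>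
    match pvAscColA t c (PySem.List.pyRange 0 3 1) 0 with
    | none => none
    | some false => some false
    | some true => pvLoop5A t rest

def pvRunA (t : List (List (Option Int))) : Option Bool :=
  if t.any (fun row => pvRowCountA row ≠ 5) then some false
  else
    match pvLoop2A t (PySem.List.pyRange 0 9 1) with
    | none => none
    | some false => some false
    | some true =>
      if pvTotalA t ≠ 15 then some false
      else
        match pvLoop4A t (PySem.List.pyRange 0 9 1) with
        | none => none
        | some false => some false
        | some true =>
          match pvLoop5A t (PySem.List.pyRange 0 9 1) with
          | none => none
          | some b => some b

def validate_ticket_py (ticket : List (List (Option Int))) : Bool :=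
  (pvRunA ticket).getD false   -- the default is never used under Pre_ (none = IndexError)

-- ===== PORT B =====
-- enumerate(COLUMN_RANGES): (col, start, end)
def pvColRangesB : List (Int × Int × Int) :=
  [(0,1,9),(1,10,19),(2,20,29),(3,30,39),(4,40,49),(5,50,59),(6,60,69),(7,70,79),(8,80,90)]

-- ticket[r][c]
def pvCellB (t : List (List (Option Int))) (r c : Int) : Option (Option Int) :=
  match PySem.List.pyGet? t r with
  | none => none
  | some row => PySem.List.pyGet? row c

def pvRowCountB (row : List (Option Int)) : Int :=
  row.foldl (fun acc cell => if cell.isSome then acc + 1 else acc) 0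

-- one fused column pass: none = IndexError, some none = early `return False`,
-- some (some count) = loop finished with this count
def pvColB (t : List (List (Option Int))) (c lo hi : Int) :
    List Int → Int → Int → Option (Option Int)
  | [], count, _ => some (some count)
  | r :: rest, count, prev =>
    match pvCellB t r c with
    | none => none
    | some none => pvColB t c lo hi rest count prev
    | some (some n) =>
      if n < lo ∨ n > hi then some none
      else if n ≤ prev then some none
      else pvColB t c lo hi rest (count + 1) n

def pvColsB (t : List (List (Option Int))) : List (Int × Int × Int) → Option Bool
  | [] => some true
  | (c, lo, hi) :: rest =>
    match pvColB t c lo hi (PySem.List.pyRange 0 3 1) 0 0 with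
    | none => none
    | some none => some false
    | some (some count) => if count = 0 then some false else pvColsB t rest

def validate_ticket_py_alt (ticket : List (List (Option Int))) : Bool :=
  if ticket.any (fun row => pvRowCountB row ≠ 5) then false
  else if (ticket.length : Int) ≠ 3 then false
  else (pvColsB ticket pvColRangesB).getD false   -- default never used under Pre_

-- ===== PRECONDITION & SPEC =====
-- number count of a row; cell (row i, col c) of the first three rows
def pvCnt (row : List (Option Int)) : Nat := (row.filter Option.isSome).length
def pvC3 (t : List (List (Option Int))) (i c : Nat) : Option Int :=
  (t.getD i []).getD c (some 0)
def pvMin3 (t : List (List (Option Int))) : Nat :=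
  min (t.getD 0 []).length (min (t.getD 1 []).length (t.getD 2 []).length)

-- Pre_ admits exactly the tickets on which A RETURNS (no IndexError): either some row's
-- number count is ≠ 5 (A returns False in its first pass, touching no index), or the grid has
-- ≥ 3 rows and either the first three rows all reach column 8, or some column readable in all
-- three rows is entirely empty (A returns False at it before indexing past a short row).
def Pre_validate_ticket_py (ticket : List (List (Option Int))) : Prop :=
  (∃ row ∈ ticket, pvCnt row ≠ 5) ∨
  (3 ≤ ticket.length ∧
    (9 ≤ pvMin3 ticket ∨
      ∃ c ∈ List.range (pvMin3 ticket),
        pvC3 ticket 0 c = none ∧ pvC3 ticket 1 c = none ∧ pvC3 ticket 2 c = none))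
instance (ticket : List (List (Option Int))) : Decidable (Pre_validate_ticket_py ticket) := by
  unfold Pre_validate_ticket_py; infer_instance

def pvWitness_validate_ticket_py : List (List (Option Int)) := [[some 1, none]]

def Spec_validate_ticket_py (ticket : List (List (Option Int))) (out : Bool) : Prop := out = validate_ticket_py_alt ticket
instance (ticket : List (List (Option Int))) (out : Bool) : Decidable (Spec_validate_ticket_py ticket out) := by unfold Spec_validate_ticket_py; infer_instance

-- ===== CLAIM (what is proved, stated in full; the proofs are below) =====
def Claim_equal_validate_ticket_py : Prop := ∀ (ticket : List (List (Option Int))), Dom_validate_ticket_py ticket → Pre_validate_ticket_py ticket → Spec_validate_ticket_py ticket (validate_ticket_py ticket)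

-- ===== LEMMAS AND PROOFS =====

-- the column count A computes, as a pure function of the first three rows
def pvColCnt (t : List (List (Option Int))) (n : Nat) : Int :=
  (if (pvC3 t 0 n).isSome then (1:Int) else 0) + (if (pvC3 t 1 n).isSome then 1 else 0) +
  (if (pvC3 t 2 n).isSome then 1 else 0)

lemma pvRange3 : PySem.List.pyRange 0 3 1 = [0, 1, 2] := by decide

lemma pvCellB_eq_A : pvCellB = pvCellA := rfl

lemma pvFoldCnt (l : List (Option Int)) : ∀ (a : Int),
    l.foldl (fun acc cell => if cell.isSome then acc + 1 else acc) a
      = a + ((l.filter Option.isSome).length : Int) := by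
  induction l with
  | nil => intro a; simp
  | cons x xs ih =>
    intro a
    cases hx : x.isSome <;> simp [hx, ih] <;> omega

lemma pvRowCountA_eq (row : List (Option Int)) : pvRowCountA row = (pvCnt row : Int) := by
  simpa [pvRowCountA, pvCnt] using pvFoldCnt row 0

lemma pvCellA_eval (t : List (List (Option Int))) (h3 : 3 ≤ t.length)
    (i : Nat) (hi : i < 3) (n : Nat) (hn : n < pvMin3 t) :
    pvCellA t (i : Int) (n : Int) = some (pvC3 t i n) := by
  rcases t with _ | ⟨r0, _ | ⟨r1, _ | ⟨r2, rest⟩⟩⟩ <;> simp at h3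
  simp only [pvMin3, List.getD_cons_zero, List.getD_cons_succ] at hn
  interval_cases i <;>
    simp [pvCellA, pvC3, pysem] <;> (try rw [List.getElem?_eq_getElem (by omega)]) <;> simp

lemma pvColCountA_eval (t : List (List (Option Int))) (h3 : 3 ≤ t.length)
    (n : Nat) (hn : n < pvMin3 t) :
    pvColCountA t (n : Int) = some (pvColCnt t n) := by
  have e0 := pvCellA_eval t h3 0 (by omega) n hn
  have e1 := pvCellA_eval t h3 1 (by omega) n hn
  have e2 := pvCellA_eval t h3 2 (by omega) n hn
  simp only [Nat.cast_zero, Nat.cast_one, Nat.cast_ofNat] at e0 e1 e2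
  simp [pvColCountA, pvColCnt, e0, e1, e2]

lemma pvTotalA_eq (t : List (List (Option Int))) (h : ∀ row ∈ t, pvRowCountA row = 5) :
    pvTotalA t = 5 * (t.length : Int) := by
  have aux : ∀ (l : List (List (Option Int))) (a : Int), (∀ row ∈ l, pvRowCountA row = 5) →
      l.foldl (fun acc row => acc + pvRowCountA row) a = a + 5 * (l.length : Int) := by
    intro l
    induction l with
    | nil => intro a _; simp
    | cons x xs ih =>
      intro a h
      have hx := h x (by simp)
      rw [List.foldl_cons, hx, ih _ (fun r hr => h r (by simp [hr]))]
      simp; ring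
  simpa [pvTotalA] using aux t 0 h


def pvLo (k : Nat) : Int := (pvColRangesA.getD k (0,0)).1
def pvHi (k : Nat) : Int := (pvColRangesA.getD k (0,0)).2

lemma pvRangeCons (k : Nat) (hk : k < 9) :
    PySem.List.pyRange (k : Int) 9 1 = (k : Int) :: PySem.List.pyRange ((k+1 : Nat) : Int) 9 1 := by
  rw [PySem.List.pyRange_one_cons (by exact_mod_cast hk)]
  push_cast
  ring_nf

lemma pvRangeNil : PySem.List.pyRange ((9:Nat) : Int) 9 1 = [] := by decide

lemma pvLookupA (k : Nat) (hk : k < 9) :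
    PySem.List.pyGet? pvColRangesA (k : Int) = some (pvLo k, pvHi k) := by
  interval_cases k <;> rfl

lemma pvDropB (k : Nat) (hk : k < 9) :
    pvColRangesB.drop k = ((k : Int), pvLo k, pvHi k) :: pvColRangesB.drop (k+1) := by
  interval_cases k <;> rfl

lemma pvCellA_eval0 (t : List (List (Option Int))) (h3 : 3 ≤ t.length)
    (n : Nat) (hn : n < pvMin3 t) : pvCellA t 0 (n : Int) = some (pvC3 t 0 n) := by
  simpa using pvCellA_eval t h3 0 (by omega) n hn

lemma pvCellA_eval1 (t : List (List (Option Int))) (h3 : 3 ≤ t.length)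
    (n : Nat) (hn : n < pvMin3 t) : pvCellA t 1 (n : Int) = some (pvC3 t 1 n) := by
  simpa using pvCellA_eval t h3 1 (by omega) n hn

lemma pvCellA_eval2 (t : List (List (Option Int))) (h3 : 3 ≤ t.length)
    (n : Nat) (hn : n < pvMin3 t) : pvCellA t 2 (n : Int) = some (pvC3 t 2 n) := by
  simpa using pvCellA_eval t h3 2 (by omega) n hn

-- pure per-column mirrors of the loop bodies, on the three cells of a column
def pvROKL (lo hi : Int) : List (Option Int) → Bool
  | [] => true
  | none :: rest => pvROKL lo hi rest
  | some n :: rest => if n < lo ∨ n > hi then false else pvROKL lo hi rest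

def pvAscL (p : Int) : List (Option Int) → Bool
  | [] => true
  | none :: rest => pvAscL p rest
  | some n :: rest => if n ≤ p then false else pvAscL n rest

def pvBL (lo hi cnt p : Int) : List (Option Int) → Option Int
  | [] => some cnt
  | none :: rest => pvBL lo hi cnt p rest
  | some n :: rest =>
    if n < lo ∨ n > hi then none else if n ≤ p then none else pvBL lo hi (cnt + 1) n rest

def pvBOK (lo hi : Int) (xs : List (Option Int)) : Bool :=
  match pvBL lo hi 0 0 xs with
  | none => false
  | some cnt => if cnt = 0 then false else true

def pvCnt3 (x0 x1 x2 : Option Int) : Int :=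
  (if x0.isSome then (1:Int) else 0) + (if x1.isSome then 1 else 0) + (if x2.isSome then 1 else 0)

lemma pvLoop2A_head (t : List (List (Option Int))) (l : List Int) (k : Nat) (v2 : Bool)
    (hcc : pvColCountA t (k : Int) = some (pvColCnt t k))
    (e2 : pvLoop2A t l = some v2) :
    pvLoop2A t ((k : Int) :: l)
      = some ((if pvColCnt t k < 1 ∨ pvColCnt t k > 3 then false else true) && v2) := by
  rw [show pvLoop2A t ((k:Int) :: l) = (match pvColCountA t (k:Int) with
      | none => none
      | some kk => if kk < 1 ∨ kk > 3 then some false else pvLoop2A t l) from rfl, hcc]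
  split_ifs with h
  · simp [h]
  · rw [e2]; simp [h]

lemma pvRangeColA_head (t : List (List (Option Int))) (c lo hi : Int) (x0 x1 x2 : Option Int)
    (h0 : pvCellA t 0 c = some x0) (h1 : pvCellA t 1 c = some x1) (h2 : pvCellA t 2 c = some x2) :
    pvRangeColA t c lo hi (PySem.List.pyRange 0 3 1) = some (pvROKL lo hi [x0, x1, x2]) := by
  rw [pvRange3]
  rcases x0 with _ | n0 <;> rcases x1 with _ | n1 <;> rcases x2 with _ | n2 <;>
    simp only [pvRangeColA, pvROKL, h0, h1, h2] <;> (try split_ifs) <;> simp_all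

lemma pvAscColA_head (t : List (List (Option Int))) (c : Int) (x0 x1 x2 : Option Int)
    (h0 : pvCellA t 0 c = some x0) (h1 : pvCellA t 1 c = some x1) (h2 : pvCellA t 2 c = some x2) :
    pvAscColA t c (PySem.List.pyRange 0 3 1) 0 = some (pvAscL 0 [x0, x1, x2]) := by
  rw [pvRange3]
  rcases x0 with _ | n0 <;> rcases x1 with _ | n1 <;> rcases x2 with _ | n2 <;>
    simp only [pvAscColA, pvAscL, h0, h1, h2] <;> (try split_ifs) <;> simp_all

lemma pvColB_head (t : List (List (Option Int))) (c lo hi : Int) (x0 x1 x2 : Option Int)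
    (h0 : pvCellA t 0 c = some x0) (h1 : pvCellA t 1 c = some x1) (h2 : pvCellA t 2 c = some x2) :
    pvColB t c lo hi (PySem.List.pyRange 0 3 1) 0 0 = some (pvBL lo hi 0 0 [x0, x1, x2]) := by
  rw [pvRange3]
  rcases x0 with _ | n0 <;> rcases x1 with _ | n1 <;> rcases x2 with _ | n2 <;>
    simp only [pvColB, pvCellB_eq_A, pvBL, h0, h1, h2] <;> (try split_ifs) <;> simp_all

lemma pvLoop4A_head (t : List (List (Option Int))) (l : List Int) (k : Nat) (hk9 : k < 9)
    (x0 x1 x2 : Option Int) (v4 : Bool)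
    (h0 : pvCellA t 0 (k : Int) = some x0) (h1 : pvCellA t 1 (k : Int) = some x1)
    (h2 : pvCellA t 2 (k : Int) = some x2) (e4 : pvLoop4A t l = some v4) :
    pvLoop4A t ((k : Int) :: l) = some (pvROKL (pvLo k) (pvHi k) [x0, x1, x2] && v4) := by
  rw [show pvLoop4A t ((k:Int) :: l) = (match PySem.List.pyGet? pvColRangesA (k:Int) with
      | none => none
      | some (lo, hi) =>
        match pvRangeColA t (k:Int) lo hi (PySem.List.pyRange 0 3 1) with
        | none => none
        | some false => some false
        | some true => pvLoop4A t l) from rfl,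
    pvLookupA k hk9]
  show (match pvRangeColA t (k:Int) (pvLo k) (pvHi k) (PySem.List.pyRange 0 3 1) with
      | none => (none : Option Bool)
      | some false => some false
      | some true => pvLoop4A t l) = _
  rw [pvRangeColA_head t _ _ _ x0 x1 x2 h0 h1 h2]
  cases pvROKL (pvLo k) (pvHi k) [x0, x1, x2] <;> simp [e4]

lemma pvLoop5A_head (t : List (List (Option Int))) (l : List Int) (k : Nat)
    (x0 x1 x2 : Option Int) (v5 : Bool)
    (h0 : pvCellA t 0 (k : Int) = some x0) (h1 : pvCellA t 1 (k : Int) = some x1)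
    (h2 : pvCellA t 2 (k : Int) = some x2) (e5 : pvLoop5A t l = some v5) :
    pvLoop5A t ((k : Int) :: l) = some (pvAscL 0 [x0, x1, x2] && v5) := by
  rw [show pvLoop5A t ((k:Int) :: l) = (match pvAscColA t (k:Int) (PySem.List.pyRange 0 3 1) 0 with
      | none => none
      | some false => some false
      | some true => pvLoop5A t l) from rfl,
    pvAscColA_head t _ x0 x1 x2 h0 h1 h2]
  cases pvAscL 0 [x0, x1, x2] <;> simp [e5]

lemma pvColsB_head (t : List (List (Option Int))) (l : List (Int × Int × Int)) (k : Nat)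
    (x0 x1 x2 : Option Int) (vb : Bool)
    (h0 : pvCellA t 0 (k : Int) = some x0) (h1 : pvCellA t 1 (k : Int) = some x1)
    (h2 : pvCellA t 2 (k : Int) = some x2) (eb : pvColsB t l = some vb) :
    pvColsB t (((k : Int), pvLo k, pvHi k) :: l)
      = some (pvBOK (pvLo k) (pvHi k) [x0, x1, x2] && vb) := by
  rw [show pvColsB t (((k : Int), pvLo k, pvHi k) :: l)
      = (match pvColB t (k:Int) (pvLo k) (pvHi k) (PySem.List.pyRange 0 3 1) 0 0 with
        | none => none
        | some none => some false
        | some (some count) => if count = 0 then some false else pvColsB t l) from rfl,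
    pvColB_head t _ _ _ x0 x1 x2 h0 h1 h2]
  unfold pvBOK
  rcases pvBL (pvLo k) (pvHi k) 0 0 [x0, x1, x2] with _ | cnt
  · simp
  · by_cases hc : cnt = 0 <;> simp [hc, eb]

lemma pvColIden (lo hi : Int) (x0 x1 x2 : Option Int) :
    (((if pvCnt3 x0 x1 x2 < 1 ∨ pvCnt3 x0 x1 x2 > 3 then false else true) &&
        pvROKL lo hi [x0, x1, x2]) && pvAscL 0 [x0, x1, x2]) = pvBOK lo hi [x0, x1, x2] := by
  rcases x0 with _ | n0 <;> rcases x1 with _ | n1 <;> rcases x2 with _ | n2 <;>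
    simp only [pvCnt3, pvROKL, pvAscL, pvBOK, pvBL, Option.isSome_none, Option.isSome_some] <;>
    norm_num <;> (try split_ifs) <;> simp_all <;> omega

-- the heart of the equivalence on well-shaped grids: from column k on, A's three remaining
-- column passes conjoined give exactly B's fused pass
set_option maxHeartbeats 2000000 in
lemma pvSuffix_eq (t : List (List (Option Int))) (h3 : 3 ≤ t.length) (h9 : 9 ≤ pvMin3 t) :
    ∀ (d k : Nat), k + d = 9 →
      ∃ v2 v4 v5 vb,
        pvLoop2A t (PySem.List.pyRange (k : Int) 9 1) = some v2 ∧
        pvLoop4A t (PySem.List.pyRange (k : Int) 9 1) = some v4 ∧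
        pvLoop5A t (PySem.List.pyRange (k : Int) 9 1) = some v5 ∧
        pvColsB t (pvColRangesB.drop k) = some vb ∧
        ((v2 && v4) && v5) = vb := by
  intro d
  induction d with
  | zero =>
    intro k hk
    have hk9 : k = 9 := by omega
    subst hk9
    refine ⟨true, true, true, true, ?_, ?_, ?_, ?_, rfl⟩
    · rw [pvRangeNil]; rfl
    · rw [pvRangeNil]; rfl
    · rw [pvRangeNil]; rfl
    · rfl
  | succ d ih =>
    intro k hk
    have hk9 : k < 9 := by omega
    have hkm : k < pvMin3 t := by omega
    obtain ⟨v2, v4, v5, vb, e2, e4, e5, eb, hv⟩ := ih (k+1) (by omega)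
    have c0e := pvCellA_eval0 t h3 k hkm
    have c1e := pvCellA_eval1 t h3 k hkm
    have c2e := pvCellA_eval2 t h3 k hkm
    rw [pvRangeCons k hk9, pvDropB k hk9]
    have hcc := pvColCountA_eval t h3 k hkm
    have c0e := pvCellA_eval0 t h3 k hkm
    have c1e := pvCellA_eval1 t h3 k hkm
    have c2e := pvCellA_eval2 t h3 k hkm
    rw [pvLoop2A_head t _ k v2 hcc e2,
        pvLoop4A_head t _ k hk9 _ _ _ v4 c0e c1e c2e e4,
        pvLoop5A_head t _ k _ _ _ v5 c0e c1e c2e e5,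
        pvColsB_head t _ k _ _ _ vb c0e c1e c2e eb]
    refine ⟨_, _, _, _, rfl, rfl, rfl, rfl, ?_⟩
    rw [show pvColCnt t k = pvCnt3 (pvC3 t 0 k) (pvC3 t 1 k) (pvC3 t 2 k) from rfl,
        ← pvColIden (pvLo k) (pvHi k) (pvC3 t 0 k) (pvC3 t 1 k) (pvC3 t 2 k), ← hv]
    simp [Bool.and_assoc, Bool.and_comm, Bool.and_left_comm]

lemma pvLoop2A_false (t : List (List (Option Int))) (h3 : 3 ≤ t.length)
    (c0 : Nat) (hc0 : c0 < pvMin3 t) (hc9 : c0 < 9)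
    (hnone : pvC3 t 0 c0 = none ∧ pvC3 t 1 c0 = none ∧ pvC3 t 2 c0 = none) :
    ∀ (d k : Nat), k + d = 9 → k ≤ c0 → pvLoop2A t (PySem.List.pyRange (k : Int) 9 1) = some false := by
  intro d
  induction d with
  | zero => intro k hk hkc; exfalso; omega
  | succ d ih =>
    intro k hk hkc
    have hk9 : k < 9 := by omega
    have hkm : k < pvMin3 t := by omega
    rw [pvRangeCons k hk9]
    simp only [pvLoop2A, pvColCountA_eval t h3 k hkm]
    split_ifs with hcond
    · rfl
    · have hne : k ≠ c0 := by
        rintro rfl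
        exact hcond (Or.inl (by simp [pvColCnt, hnone.1, hnone.2.1, hnone.2.2]))
      exact ih (k+1) (by omega) (by omega)

lemma pvColsB_false (t : List (List (Option Int))) (h3 : 3 ≤ t.length)
    (c0 : Nat) (hc0 : c0 < pvMin3 t) (hc9 : c0 < 9)
    (hnone : pvC3 t 0 c0 = none ∧ pvC3 t 1 c0 = none ∧ pvC3 t 2 c0 = none) :
    ∀ (d k : Nat), k + d = 9 → k ≤ c0 → pvColsB t (pvColRangesB.drop k) = some false := by
  intro d
  induction d with
  | zero => intro k hk hkc; exfalso; omega
  | succ d ih =>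
    intro k hk hkc
    have hk9 : k < 9 := by omega
    have hkm : k < pvMin3 t := by omega
    have c0e := pvCellA_eval0 t h3 k hkm
    have c1e := pvCellA_eval1 t h3 k hkm
    have c2e := pvCellA_eval2 t h3 k hkm
    rw [pvDropB k hk9]
    by_cases hkc0 : k = c0
    · subst hkc0
      simp [pvColsB, pvRange3, pvColB, pvCellB_eq_A, c0e, c1e, c2e,
        hnone.1, hnone.2.1, hnone.2.2]
    · rcases h0 : pvC3 t 0 k with _ | n0 <;> rcases h1 : pvC3 t 1 k with _ | n1 <;>
        rcases h2 : pvC3 t 2 k with _ | n2 <;>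
        simp only [pvColsB, pvRange3, pvColB, pvCellB_eq_A, c0e, c1e, c2e, h0, h1, h2] <;>
        split_ifs <;>
        first
          | rfl
          | exact ih (k+1) (by omega) (by omega)
          | simp_all

-- ===== VERDICT (by name: the statement is the Claim_ definition above) =====
lemma pvRowCountB_eq_A : pvRowCountB = pvRowCountA := rfl

theorem validate_ticket_py_spec : Claim_equal_validate_ticket_py := by
  intro t _ hPre
  unfold Spec_validate_ticket_py
  by_cases hb : ∃ row ∈ t, pvCnt row ≠ 5
  · obtain ⟨row, hmem, hne⟩ := hb
    have hA : (t.any fun row => pvRowCountA row ≠ 5) = true :=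
      List.any_eq_true.mpr ⟨row, hmem, by
        simp only [pvRowCountA_eq, decide_eq_true_eq]
        exact_mod_cast hne⟩
    unfold validate_ticket_py pvRunA validate_ticket_py_alt
    rw [pvRowCountB_eq_A, hA]
    rfl
  · have hAll : ∀ row ∈ t, pvCnt row = 5 := by
      intro row hr
      by_contra hne
      exact hb ⟨row, hr, hne⟩
    obtain ⟨h3, hsh⟩ := hPre.resolve_left hb
    have hAnyA : (t.any fun row => pvRowCountA row ≠ 5) = false := by
      simp only [List.any_eq_false, decide_eq_true_eq, not_not]
      intro row hr
      rw [pvRowCountA_eq, hAll row hr]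
      rfl
    have hAllA : ∀ row ∈ t, pvRowCountA row = 5 := by
      intro row hr
      rw [pvRowCountA_eq, hAll row hr]
      rfl
    by_cases h9 : 9 ≤ pvMin3 t
    · -- the first three rows reach column 8: compare the full passes column by column
      obtain ⟨v2, v4, v5, vb, e2, e4, e5, eb, hv⟩ := pvSuffix_eq t h3 h9 9 0 rfl
      simp only [Nat.cast_zero] at e2 e4 e5
      rw [List.drop_zero] at eb
      have htot : pvTotalA t = 5 * (t.length : Int) := pvTotalA_eq t hAllA
      unfold validate_ticket_py pvRunA validate_ticket_py_alt
      rw [pvRowCountB_eq_A, hAnyA, e2, e4, e5, eb, htot]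
      by_cases hlen : t.length = 3
      · rw [hlen]
        cases v2 <;> cases v4 <;> cases v5 <;> simp_all
      · have hlen4 : 4 ≤ t.length := by omega
        have h15 : (5 * (t.length : Int) ≠ 15) := by
          intro h
          have : (t.length : Int) = 3 := by omega
          omega
        have hlenI : ((t.length : Int) ≠ 3) := by
          intro h
          exact hlen (by exact_mod_cast h)
        cases v2 <;> simp [h15, hlenI]
    · obtain ⟨c0, hc0r, hns⟩ := hsh.resolve_left h9
      have hc0m : c0 < pvMin3 t := List.mem_range.mp hc0r
      have hc09 : c0 < 9 := by omega
      have hA2 := pvLoop2A_false t h3 c0 hc0m hc09 hns 9 0 rfl (by omega)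
      have hB2 := pvColsB_false t h3 c0 hc0m hc09 hns 9 0 rfl (by omega)
      simp only [Nat.cast_zero] at hA2
      rw [List.drop_zero] at hB2
      unfold validate_ticket_py pvRunA validate_ticket_py_alt
      rw [pvRowCountB_eq_A, hAnyA, hA2, hB2]
      split_ifs <;> rfl
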